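-- pv_equiv track=rewrite | github.com/fostiropoulos/ablator | ablator/analysis/plot/utils.py | parse_name_remap
-- ===== SOURCE A (Python) =====
-- def parse_name_remap(
--     defaults: list[str] | None = None, name_map: dict[str, str] | None = None
-- ) -> dict[str, str]:
--     """
--     Returns a dictionary mapping input attribute names to output attribute names,
--     with optional remapping based on ``name_map``.
--
--     Parameters
--     ----------
--     defaults : list[str] | None
--         The default attribute names to use as keys in the output dictionary.
--         If ``None``, the output dictionary will be based on ``name_map`` only.
--     name_map : dict[str, str] | None
--         A dictionary mapping input attribute names to output attribute names.
--         If ``None``, the output dictionary will be based on ``defaults`` only.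
--
--     Returns
--     -------
--     dict[str, str]
--         A dictionary mapping input attribute names to output attribute names.
--
--     Raises
--     ------
--     NotImplementedError
--         If ``defaults`` and ``name_map`` are both ``None``.
--
--     Examples
--     --------
--     >>> defaults = ["attr1", "attr2", "attr3"]
--     >>> name_map = {"attr2": "new_attr2", "attr4": "attr4_renamed"}
--     >>> name_remap = parse_name_remap(defaults, name_map)
--     >>> assert name_remap == {"attr1": "attr1", "attr2": "new_attr2", "attr3": "attr3"}
--     >>> name_remap = parse_name_remap(defaults)
--     >>> assert name_remap == {"attr1": "attr1", "attr2": "attr2", "attr3": "attr3"}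
--     >>> name_remap = parse_name_remap(name_map=name_map)
--     >>> assert name_remap == {"attr2": "new_attr2", "attr4": "attr4_renamed"}
--     """
--     if name_map is not None and defaults is None:
--         name_remap = name_map
--     elif name_map is not None and defaults is not None:
--         name_remap = {k: name_map[k] if k in name_map else k for k in defaults}
--     elif defaults is not None:
--         name_remap = dict(zip(defaults, defaults))
--     else:
--         raise NotImplementedError("`defaults` or `name_map` argument required.")
--     return name_remap
-- ===== SOURCE B (Python) =====
-- def parse_name_remap(defaults=None, name_map=None):
--     if defaults is None and name_map is None:
--         raise NotImplementedError("`defaults` or `name_map` argument required.")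
--     if defaults is None:
--         return name_map
--     base = {k: k for k in defaults}
--     if name_map is not None:
--         for key, val in name_map.items():
--             if key in base:
--                 base[key] = val
--     return base
-- ===== Notes on version B (the rewrite author's own statement) =====
-- stated objective: alternative
-- what changed: B builds an identity dict from defaults first and then overlays name_map by iterating over name_map's items (skipping keys absent from the base), instead of A's single comprehension over defaults that looks each key up in name_map; the None/None error and the name_map-only passthrough are handled by early exits.
import Mathlib
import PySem

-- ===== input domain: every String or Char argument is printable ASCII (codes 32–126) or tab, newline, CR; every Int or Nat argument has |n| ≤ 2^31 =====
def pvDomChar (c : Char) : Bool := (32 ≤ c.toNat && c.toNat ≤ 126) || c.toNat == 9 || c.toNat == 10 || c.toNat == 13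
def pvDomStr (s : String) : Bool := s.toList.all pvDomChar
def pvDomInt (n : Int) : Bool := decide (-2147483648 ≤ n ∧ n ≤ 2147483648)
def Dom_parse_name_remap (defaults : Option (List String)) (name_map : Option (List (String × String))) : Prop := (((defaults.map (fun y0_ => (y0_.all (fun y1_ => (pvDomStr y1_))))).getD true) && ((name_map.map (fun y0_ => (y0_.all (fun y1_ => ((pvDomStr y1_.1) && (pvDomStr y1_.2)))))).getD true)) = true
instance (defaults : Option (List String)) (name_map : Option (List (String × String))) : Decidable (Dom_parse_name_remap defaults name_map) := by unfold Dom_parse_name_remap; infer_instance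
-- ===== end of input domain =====

-- B builds the identity dict from defaults then overlays name_map's items (skipping keys
-- absent from the base), instead of A's single comprehension over defaults looking up name_map.


-- ===== PORT A =====
-- `name_map[k] if k in name_map else k`: get? is first-match lookup, some ↔ `k in name_map`
def pvA_value (nm : List (String × String)) (k : String) : String :=
  match (PySem.Dict.mk nm).get? k with
  | some v => v
  | none => k

def parse_name_remap (defaults : Option (List String)) (name_map : Option (List (String × String))) : List (String × String) :=
  match name_map, defaults with
  | some nm, none => nm
  | some nm, some ds =>
      (ds.foldl (fun d k => d.insert k (pvA_value nm k)) PySem.Dict.empty).items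
  | none, some ds =>
      -- dict(zip(defaults, defaults))
      (ds.foldl (fun d k => d.insert k k) PySem.Dict.empty).items
  | none, none => []  -- A raises NotImplementedError; excluded by Pre_

-- ===== PORT B =====
def parse_name_remap_alt (defaults : Option (List String)) (name_map : Option (List (String × String))) : List (String × String) :=
  match defaults with
  | none =>
      match name_map with
      | some nm => nm
      | none => []  -- B raises NotImplementedError; excluded by Pre_
  | some ds =>
      let base := ds.foldl (fun d k => d.insert k k) PySem.Dict.empty
      match name_map with
      | none => base.items
      | some nm =>
          (nm.foldl (fun b p => if b.contains p.1 then b.insert p.1 p.2 else b) base).items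

-- ===== PRECONDITION & SPEC =====
-- Pre_ excludes (a) defaults = name_map = None, where A raises NotImplementedError (B raises too),
-- and (b) association lists with duplicate keys in name_map, which cannot arise from a Python dict
-- (the Python argument type) and on which first-match vs last-write lookup is accidental.
def Pre_parse_name_remap (defaults : Option (List String)) (name_map : Option (List (String × String))) : Prop :=
  (defaults ≠ none ∨ name_map ≠ none) ∧
  ((name_map.getD []).map Prod.fst).Nodup
instance (defaults : Option (List String)) (name_map : Option (List (String × String))) : Decidable (Pre_parse_name_remap defaults name_map) := by unfold Pre_parse_name_remap; infer_instance

def pvWitness_parse_name_remap : Option (List String) × (Option (List (String × String))) :=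
  (some ["attr1", "attr2"], some [("attr2", "new2"), ("attr4", "x")])

def Spec_parse_name_remap (defaults : Option (List String)) (name_map : Option (List (String × String))) (out : List (String × String)) : Prop := out = parse_name_remap_alt defaults name_map
instance (defaults : Option (List String)) (name_map : Option (List (String × String))) (out : List (String × String)) : Decidable (Spec_parse_name_remap defaults name_map out) := by unfold Spec_parse_name_remap; infer_instance

-- ===== CLAIM (what is proved, stated in full; the proofs are below) =====
def Claim_equal_parse_name_remap : Prop := ∀ (defaults : Option (List String)) (name_map : Option (List (String × String))), Dom_parse_name_remap defaults name_map → Pre_parse_name_remap defaults name_map → Spec_parse_name_remap defaults name_map (parse_name_remap defaults name_map)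

-- ===== LEMMAS AND PROOFS =====

-- get? after a loop inserting a key-determined value for each k in ds
theorem pv_get?_foldl_insert (ds : List String) (f : String → String)
    (d : PySem.Dict String String) (x : String) :
    (ds.foldl (fun d k => d.insert k (f k)) d).get? x
      = if x ∈ ds then some (f x) else d.get? x := by
  induction ds generalizing d with
  | nil => simp
  | cons a t ih =>
      simp only [List.foldl_cons, ih, List.mem_cons]
      by_cases hxt : x ∈ t
      · simp [hxt]
      · by_cases hxa : x = a
        · subst hxa; simp [hxt, PySem.Dict.get?_insert_self]
        · simp [hxt, hxa, PySem.Dict.get?_insert_of_ne _ _ hxa]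

-- the overlay loop never adds keys
theorem pv_keys_overlay (nm : List (String × String)) (b : PySem.Dict String String) :
    (nm.foldl (fun b p => if b.contains p.1 then b.insert p.1 p.2 else b) b).keys = b.keys := by
  induction nm generalizing b with
  | nil => rfl
  | cons p t ih =>
      simp only [List.foldl_cons]
      rw [ih]
      by_cases h : b.contains p.1 = true
      · simp [h, PySem.Dict.keys_insert_of_contains b p.2 h]
      · simp [h]

-- get? after the overlay loop, on a name_map with distinct keys
theorem pv_get?_overlay (nm : List (String × String)) :
    ∀ (b : PySem.Dict String String) (x : String), (nm.map Prod.fst).Nodup →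
    (nm.foldl (fun b p => if b.contains p.1 then b.insert p.1 p.2 else b) b).get? x
      = match b.get? x with
        | none => none
        | some w => some (((PySem.Dict.mk nm).get? x).getD w) := by
  induction nm with
  | nil =>
      intro b x _
      simp only [List.foldl_nil]
      cases h : b.get? x <;> simp [PySem.Dict.get?]
  | cons p t ih =>
      intro b x hnd
      obtain ⟨k, v⟩ := p
      simp only [List.map_cons, List.nodup_cons] at hnd
      simp only [List.foldl_cons]
      rw [ih _ _ hnd.2]
      by_cases hxk : x = k
      · subst hxk
        have hx_t : (PySem.Dict.mk t).get? x = none := by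
          rw [PySem.Dict.get?_eq_none_iff_not_mem_keys]
          simpa [PySem.Dict.keys] using hnd.1
        by_cases hc : b.contains x = true
        · have hb : ∃ w, b.get? x = some w := by
            have := PySem.Dict.contains_eq_isSome_get? b x
            rw [hc] at this
            cases h : b.get? x
            · rw [h] at this; simp at this
            · exact ⟨_, rfl⟩
          obtain ⟨w, hw⟩ := hb
          simp [hc, PySem.Dict.get?_insert_self, hw, hx_t, PySem.Dict.get?_mk_cons]
        · have hb : b.get? x = none := by
            have := PySem.Dict.contains_eq_isSome_get? b x
            simp only [Bool.not_eq_true] at hc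
            rw [hc] at this
            cases h : b.get? x
            · rfl
            · rw [h] at this; simp at this
          simp [hc, hb]
      · have hne : x ≠ k := hxk
        by_cases hc : b.contains k = true
        · simp [hc, PySem.Dict.get?_insert_of_ne _ _ hne, PySem.Dict.get?_mk_cons,
                (Ne.symm hne : k ≠ x)]
        · simp [hc, PySem.Dict.get?_mk_cons, (Ne.symm hne : k ≠ x)]

-- A's dict and B's dict agree on every lookup (the defaults ∧ name_map branch)
theorem pv_get?_agree (ds : List String) (nm : List (String × String))
    (hnd : (nm.map Prod.fst).Nodup) (x : String) :
    (ds.foldl (fun d k => d.insert k (pvA_value nm k)) PySem.Dict.empty).get? x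
      = ((List.foldl (fun b p => if b.contains p.1 then b.insert p.1 p.2 else b)
          (ds.foldl (fun d k => d.insert k k) PySem.Dict.empty) nm)).get? x := by
  rw [pv_get?_foldl_insert, pv_get?_overlay nm _ x hnd,
      pv_get?_foldl_insert ds (fun k => k)]
  by_cases hx : x ∈ ds
  · simp only [hx, if_pos]
    unfold pvA_value
    cases h : (PySem.Dict.mk nm).get? x <;> rfl
  · simp [hx]

-- equal lookups + equal Nodup key lists ⇒ equal items lists
theorem pv_items_eq (d d' : PySem.Dict String String)
    (hk : d.keys = d'.keys) (hnd : d.keys.Nodup)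
    (hg : ∀ x, d.get? x = d'.get? x) : d.items = d'.items := by
  rw [PySem.Dict.items_eq_map_keys d hnd "", PySem.Dict.items_eq_map_keys d' (hk ▸ hnd) "", hk]
  exact List.map_congr_left (fun k _ => by
    simp [PySem.Dict.getD_eq_get?_getD, hg k])

-- ===== VERDICT (by name: the statement is the Claim_ definition above) =====
theorem parse_name_remap_spec : Claim_equal_parse_name_remap := by
  intro defaults name_map _ hpre
  obtain ⟨hsome, hnd⟩ := hpre
  unfold Spec_parse_name_remap parse_name_remap parse_name_remap_alt
  cases name_map with
  | none =>
      cases defaults with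
      | none => simp at hsome
      | some ds => rfl
  | some nm =>
      cases defaults with
      | none => rfl
      | some ds =>
          apply pv_items_eq
          · rw [pv_keys_overlay]
            rw [PySem.Dict.keys_foldl_insert, PySem.Dict.keys_foldl_insert]
          · exact PySem.Dict.nodup_keys_foldl_insert _ _ _ PySem.Dict.nodup_keys_empty
          · exact pv_get?_agree ds nm hnd
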